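-- pv_equiv track=rewrite | github.com/Blef-team/blef-ai | shared/probabilities/handler.py | group_cards
-- ===== SOURCE A (Python) =====
-- import itertools
-- from collections import defaultdict
--
-- def group_cards(cards, by="value"):
--     if by == "value":
--         with_value = defaultdict(list)
--         for value, grouped_cards in itertools.groupby(cards, lambda x: x[0]):
--             with_value[value].extend(list(grouped_cards))
--         return with_value
--     if by == "colour":
--         with_colour = defaultdict(list)
--         for colour, grouped_cards in itertools.groupby(cards, lambda x: x[1]):
--             with_colour[colour].extend(list(grouped_cards))
--         return with_colour
--     raise ValueError("'by' needs to be either 'value' or 'colour'")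
-- ===== SOURCE B (Python) =====
-- from collections import defaultdict
--
-- def group_cards(cards, by="value"):
--     if by == "value":
--         key = lambda card: card[0]
--     elif by == "colour":
--         key = lambda card: card[1]
--     else:
--         raise ValueError("'by' needs to be either 'value' or 'colour'")
--     keys = list(dict.fromkeys(key(card) for card in cards))
--     return defaultdict(list, {k: [c for c in cards if key(c) == k] for k in keys})
-- ===== Notes on version B (the rewrite author's own statement) =====
-- stated objective: alternative
-- what changed: Replaces A's single accumulating pass (groupby runs extended into a defaultdict) with two staged passes: first the distinct keys in first-occurrence order, then one whole-list filter per key to build each group, trading O(n) accumulation for an O(n*k) gather.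
import Mathlib
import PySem

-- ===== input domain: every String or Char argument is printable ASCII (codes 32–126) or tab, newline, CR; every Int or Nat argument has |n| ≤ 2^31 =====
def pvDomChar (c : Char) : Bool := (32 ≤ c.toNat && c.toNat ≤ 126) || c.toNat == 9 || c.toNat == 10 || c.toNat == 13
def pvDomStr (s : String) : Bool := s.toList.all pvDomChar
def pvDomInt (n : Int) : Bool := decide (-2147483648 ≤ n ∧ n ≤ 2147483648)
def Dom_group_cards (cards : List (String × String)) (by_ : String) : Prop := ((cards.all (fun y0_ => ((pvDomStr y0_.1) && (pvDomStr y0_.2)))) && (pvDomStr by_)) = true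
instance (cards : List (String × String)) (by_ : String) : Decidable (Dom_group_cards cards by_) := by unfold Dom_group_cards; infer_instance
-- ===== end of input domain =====

-- B groups in two staged passes (distinct keys first, then one filter of the whole list per key)
-- instead of A's single accumulating groupby-and-extend pass; return value only.

-- ===== PORT A =====
-- itertools.groupby: maximal runs of consecutive elements with equal key, in order.
def pyGroupbyAux (f : (String × String) → String) (k : String)
    (grp : List (String × String)) : List (String × String) → List (String × List (String × String))
  | [] => [(k, grp.reverse)]
  | a :: xs =>
    if f a == k then pyGroupbyAux f k (a :: grp) xs
    else (k, grp.reverse) :: pyGroupbyAux f (f a) [a] xs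

def pyGroupby (f : (String × String) → String) :
    List (String × String) → List (String × List (String × String))
  | [] => []
  | a :: xs => pyGroupbyAux f (f a) [a] xs

-- with_value[value].extend(grouped) on a defaultdict(list): read-or-create then extend in place
def extendStep (d : PySem.Dict String (List (String × String)))
    (p : String × List (String × String)) : PySem.Dict String (List (String × String)) :=
  d.insert p.1 (d.getD p.1 [] ++ p.2)

def group_cards (cards : List (String × String)) (by_ : String) : List (String × List (String × String)) :=
  if by_ == "value" then
    ((pyGroupby (fun x => x.1) cards).foldl extendStep PySem.Dict.empty).items
  else if by_ == "colour" then
    ((pyGroupby (fun x => x.2) cards).foldl extendStep PySem.Dict.empty).items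
  else
    []  -- unreachable under Pre_group_cards: Python raises ValueError here

-- ===== PORT B =====
-- keys = list(dict.fromkeys(key(card) for card in cards))
-- then {k: [c for c in cards if key(c) == k] for k in keys} as a defaultdict(list)
def gatherByKey (key : (String × String) → String) (cards : List (String × String)) :
    List (String × List (String × String)) :=
  (PySem.List.dedup (cards.map key)).map
    (fun k => (k, cards.filter (fun c => key c == k)))

def group_cards_alt (cards : List (String × String)) (by_ : String) : List (String × List (String × String)) :=
  if by_ == "value" then gatherByKey (fun c => c.1) cards
  else if by_ == "colour" then gatherByKey (fun c => c.2) cards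
  else []  -- unreachable under Pre_group_cards: Python raises ValueError here

-- ===== PRECONDITION & SPEC =====
-- Pre_ excludes exactly the inputs where A raises ValueError (by_ not 'value'/'colour').
def Pre_group_cards (cards : List (String × String)) (by_ : String) : Prop :=
  by_ = "value" ∨ by_ = "colour"
instance (cards : List (String × String)) (by_ : String) : Decidable (Pre_group_cards cards by_) := by unfold Pre_group_cards; infer_instance

def pvWitness_group_cards : (List (String × String)) × String :=
  ([("9", "h"), ("9", "s"), ("K", "h")], "value")

def Spec_group_cards (cards : List (String × String)) (by_ : String) (out : List (String × List (String × String))) : Prop := out = group_cards_alt cards by_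
instance (cards : List (String × String)) (by_ : String) (out : List (String × List (String × String))) : Decidable (Spec_group_cards cards by_ out) := by unfold Spec_group_cards; infer_instance

-- ===== CLAIM =====
def Claim_equal_group_cards : Prop := ∀ (cards : List (String × String)) (by_ : String), Dom_group_cards cards by_ → Pre_group_cards cards by_ → Spec_group_cards cards by_ (group_cards cards by_)

-- ===== LEMMAS AND PROOFS =====

-- element-by-element accumulation step (used only to characterise A's fold)
def appendStep (key : (String × String) → String)
    (d : PySem.Dict String (List (String × String))) (c : String × String) :
    PySem.Dict String (List (String × String)) :=
  d.insert (key c) (d.getD (key c) [] ++ [c])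

theorem extend_snoc (key : (String × String) → String)
    (d : PySem.Dict String (List (String × String))) (k : String)
    (g : List (String × String)) (a : String × String) (h : key a = k) :
    appendStep key (extendStep d (k, g)) a = extendStep d (k, g ++ [a]) := by
  simp [appendStep, extendStep, h, PySem.Dict.getD_insert_self,
        PySem.Dict.insert_insert_self, List.append_assoc]

-- folding extendStep over the runs produced by groupby = folding appendStep over the elements
theorem foldl_groupbyAux (key : (String × String) → String)
    (xs : List (String × String)) (k : String) (g : List (String × String))
    (d : PySem.Dict String (List (String × String))) :
    (pyGroupbyAux key k g xs).foldl extendStep d =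
      xs.foldl (appendStep key) (extendStep d (k, g.reverse)) := by
  induction xs generalizing k g d with
  | nil => simp [pyGroupbyAux]
  | cons a t ih =>
    by_cases h : key a = k
    · rw [pyGroupbyAux]
      simp only [h, BEq.rfl, if_true]
      rw [ih, List.foldl_cons, extend_snoc key d k g.reverse a h]
      simp
    · rw [pyGroupbyAux]
      simp only [beq_eq_false_iff_ne.mpr h, Bool.false_eq_true, if_false, List.foldl_cons, ih]
      rfl

theorem foldl_groupby (key : (String × String) → String) (cards : List (String × String)) :
    (pyGroupby key cards).foldl extendStep PySem.Dict.empty =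
      cards.foldl (appendStep key) PySem.Dict.empty := by
  cases cards with
  | nil => rfl
  | cons a t =>
    rw [pyGroupby, foldl_groupbyAux, List.foldl_cons]
    rfl

-- the accumulated group at any key is the filter of the processed elements
theorem getD_foldl_appendStep (key : (String × String) → String)
    (l : List (String × String)) (d : PySem.Dict String (List (String × String))) (k : String) :
    (l.foldl (appendStep key) d).getD k [] =
      d.getD k [] ++ l.filter (fun c => key c == k) := by
  induction l generalizing d with
  | nil => simp
  | cons a t ih =>
    rw [List.foldl_cons, ih]
    by_cases h : k = key a
    · simp [appendStep, h, PySem.Dict.getD_insert_self]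
    · have h' : key a ≠ k := fun e => h e.symm
      simp [appendStep, PySem.Dict.getD_insert, h, beq_eq_false_iff_ne.mpr h']

theorem keys_foldl_appendStep (key : (String × String) → String)
    (cards : List (String × String)) :
    (cards.foldl (appendStep key) PySem.Dict.empty).keys =
      PySem.List.dedup (cards.map key) := by
  unfold appendStep
  rw [PySem.Dict.keys_foldl_insert_key]
  simp [PySem.Dict.keys_empty, PySem.Set.update, PySem.Set.ofList_eq_foldl,
        PySem.List.dedup_eq_ofList]

theorem nodup_keys_foldl_appendStep (key : (String × String) → String)
    (cards : List (String × String)) :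
    (cards.foldl (appendStep key) PySem.Dict.empty).keys.Nodup := by
  unfold appendStep
  exact PySem.Dict.nodup_keys_foldl_insert_key _ _ _ _ (by simp [PySem.Dict.keys_empty])

theorem items_foldl_appendStep (key : (String × String) → String)
    (cards : List (String × String)) :
    (cards.foldl (appendStep key) PySem.Dict.empty).items = gatherByKey key cards := by
  rw [PySem.Dict.items_eq_map_keys _ (nodup_keys_foldl_appendStep key cards) [],
      keys_foldl_appendStep]
  unfold gatherByKey
  refine List.map_congr_left (fun k _ => ?_)
  rw [getD_foldl_appendStep]
  simp

-- ===== VERDICT =====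
theorem group_cards_spec : Claim_equal_group_cards := by
  intro cards by_ _ hpre
  unfold Spec_group_cards group_cards group_cards_alt
  rcases hpre with h | h <;> subst h <;>
    simp [foldl_groupby, items_foldl_appendStep]
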